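-- pv_equiv track=rewrite | github.com/jullitka/sagaart_backend | sagaart/algorithm/processing_data.py | separation_dimensions
-- ===== SOURCE A (Python) =====
-- def separation_dimensions(dimensions):
--     """Разделение параметров картины на ширину и высоту.
--     Учитывается любой разделитель между числами при условии,
--     что в строке всего два числа"""
--     if not dimensions:
--         return None
--     width_and_height = []
--     dimension = ''
--     for char in dimensions:
--         if char.isdigit():
--             dimension += char
--         else:
--             if len(width_and_height) == 0:
--                 width_and_height.append(dimension)
--             dimension = ''
--     width_and_height.append(dimension)
--     return width_and_height
-- ===== SOURCE B (Python) =====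
-- def separation_dimensions(dimensions):
--     """Разделение параметров картины на ширину и высоту.
--     Учитывается любой разделитель между числами при условии,
--     что в строке всего два числа"""
--     if not dimensions:
--         return None
--     if dimensions.isdigit():
--         return [dimensions]
--     lead = ''
--     for char in dimensions:
--         if not char.isdigit():
--             break
--         lead += char
--     trail = ''
--     for char in reversed(dimensions):
--         if not char.isdigit():
--             break
--         trail = char + trail
--     return [lead, trail]
-- ===== Notes on version B (the rewrite author's own statement) =====
-- stated objective: alternative
-- what changed: Replaced the single stateful accumulator pass (append-on-first-separator, reset-on-others) by an all-digit whole-string check plus two independent directional scans: the leading digit run scanned forward and the trailing digit run scanned over reversed(dimensions), each stopping at the first non-digit.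
import Mathlib
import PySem

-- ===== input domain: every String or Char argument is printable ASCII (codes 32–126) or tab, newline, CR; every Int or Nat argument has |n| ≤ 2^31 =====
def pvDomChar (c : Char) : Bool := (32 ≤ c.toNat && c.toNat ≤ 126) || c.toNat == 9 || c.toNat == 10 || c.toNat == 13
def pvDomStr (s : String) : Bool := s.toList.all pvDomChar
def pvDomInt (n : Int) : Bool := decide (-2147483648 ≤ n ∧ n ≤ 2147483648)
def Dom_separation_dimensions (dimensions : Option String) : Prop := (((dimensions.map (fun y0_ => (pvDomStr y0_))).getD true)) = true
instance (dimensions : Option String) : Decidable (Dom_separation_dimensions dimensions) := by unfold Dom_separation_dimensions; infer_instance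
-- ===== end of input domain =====

-- B replaces A's single stateful accumulator pass by an all-digit check plus two
-- independent directional scans (leading digit run forward, trailing digit run over the
-- reversed string); same O(n) cost, different decomposition.


-- ===== PORT A =====
-- the loop body: on a digit extend `dimension`; otherwise append `dimension` iff the
-- result list is still empty, then reset `dimension`
def sdStep (st : List String × List Char) (c : Char) : List String × List Char :=
  if PySem.Chars.isdigit c then (st.1, st.2 ++ [c])
  else if st.1.length = 0 then (st.1 ++ [String.ofList st.2], []) else (st.1, [])

def separation_dimensions (dimensions : Option String) : Option (List String) :=
  match dimensions with
  | none => none          -- `if not dimensions` (None is falsy)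
  | some s =>
    if s.toList.isEmpty then none    -- `if not dimensions` ('' is falsy)
    else
      let st := s.toList.foldl sdStep ([], [])
      some (st.1 ++ [String.ofList st.2])

-- ===== PORT B =====
-- first loop of Source B: collect leading digits, break at the first non-digit
def leadRun : List Char → List Char
  | [] => []
  | c :: cs => if PySem.Chars.isdigit c then c :: leadRun cs else []

-- second loop of Source B: over reversed(dimensions), prepend digits to `trail`, break at the first non-digit
def trailLoop : List Char → List Char → List Char
  | acc, [] => acc
  | acc, c :: cs => if PySem.Chars.isdigit c then trailLoop (c :: acc) cs else acc

def separation_dimensions_alt (dimensions : Option String) : Option (List String) :=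
  match dimensions with
  | none => none
  | some s =>
    if s.toList.isEmpty then none
    else if PySem.Chars.strIsdigit s.toList then some [s]
    else some [String.ofList (leadRun s.toList),
               String.ofList (trailLoop [] s.toList.reverse)]

-- ===== PRECONDITION & SPEC =====
def Spec_separation_dimensions (dimensions : Option String) (out : Option (List String)) : Prop := out = separation_dimensions_alt dimensions
instance (dimensions : Option String) (out : Option (List String)) : Decidable (Spec_separation_dimensions dimensions out) := by unfold Spec_separation_dimensions; infer_instance

-- ===== CLAIM (what is proved, stated in full; the proofs are below) =====
def Claim_equal_separation_dimensions : Prop := ∀ (dimensions : Option String), Dom_separation_dimensions dimensions → Spec_separation_dimensions dimensions (separation_dimensions dimensions)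

-- ===== LEMMAS AND PROOFS =====
theorem leadRun_eq_takeWhile (l : List Char) :
    leadRun l = l.takeWhile PySem.Chars.isdigit := by
  induction l with
  | nil => rfl
  | cons c cs ih => simp [leadRun, List.takeWhile_cons, ih]

theorem trailLoop_eq (acc r : List Char) :
    trailLoop acc r = (r.takeWhile PySem.Chars.isdigit).reverse ++ acc := by
  induction r generalizing acc with
  | nil => rfl
  | cons c cs ih => simp [trailLoop, List.takeWhile_cons]; split <;> simp [ih]

theorem takeWhile_append_singleton (p : Char → Bool) (l : List Char) (c : Char) :
    (l ++ [c]).takeWhile p =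
      if l.all p then l ++ [c].takeWhile p else l.takeWhile p := by
  induction l with
  | nil => simp
  | cons d ds ih =>
    by_cases hd : p d <;> simp [List.takeWhile_cons, hd, ih] <;> split <;> simp

theorem foldl_sdStep_char (l : List Char) :
    l.foldl sdStep ([], []) =
      if l.all PySem.Chars.isdigit then (([] : List String), l)
      else ([String.ofList (l.takeWhile PySem.Chars.isdigit)],
            (l.reverse.takeWhile PySem.Chars.isdigit).reverse) := by
  induction l using List.reverseRecOn with
  | nil => rfl
  | append_singleton l c ih =>
    rw [List.foldl_append, ih]
    by_cases hl : l.all PySem.Chars.isdigit <;>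
      by_cases hc : PySem.Chars.isdigit c <;>
        simp [sdStep, hl, hc, List.foldl, takeWhile_append_singleton, List.all_append]

-- ===== VERDICT (by name: the statement is the Claim_ definition above) =====
theorem separation_dimensions_spec : Claim_equal_separation_dimensions := by
  intro dimensions _
  unfold Spec_separation_dimensions
  match dimensions with
  | none => rfl
  | some s =>
    simp only [separation_dimensions, separation_dimensions_alt]
    by_cases he : s.toList.isEmpty
    · simp [he]
    · have hb : PySem.Chars.strIsdigit s.toList
          = (!s.toList.isEmpty && s.toList.all PySem.Chars.isdigit) := by
        simp [PySem.Chars.strIsdigit]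
      by_cases hall : s.toList.all PySem.Chars.isdigit
      · simp [he, foldl_sdStep_char, hall, hb]
      · simp [he, foldl_sdStep_char, hall, hb, leadRun_eq_takeWhile, trailLoop_eq]
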